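-- pv_equiv track=rewrite | github.com/sunilsoni/interview-notes-python | com/interview/2026/common/test5.py | getMinOperations
-- ===== SOURCE A (Python) =====
-- def getMinOperations(n):
--     c = 0
--     while n:
--         if n & 1 == 0:
--             n >>= 1
--         else:
--             n += 1 if n != 1 and (n & 3) == 3 else -1
--             c += 1
--     return c
-- ===== SOURCE B (Python) =====
-- def getMinOperations(n):
--     # closed form: the loop's count is the NAF weight of n = popcount((3n) XOR n)
--     return bin((3 * n) ^ n).count('1')
-- ===== Notes on version B (the rewrite author's own statement) =====
-- stated objective: simpler
-- what changed: Replaces the whole bit-by-bit while loop (with its branching on n & 3) by the single closed-form expression popcount((3*n) ^ n), the non-adjacent-form weight identity.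
import Mathlib
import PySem

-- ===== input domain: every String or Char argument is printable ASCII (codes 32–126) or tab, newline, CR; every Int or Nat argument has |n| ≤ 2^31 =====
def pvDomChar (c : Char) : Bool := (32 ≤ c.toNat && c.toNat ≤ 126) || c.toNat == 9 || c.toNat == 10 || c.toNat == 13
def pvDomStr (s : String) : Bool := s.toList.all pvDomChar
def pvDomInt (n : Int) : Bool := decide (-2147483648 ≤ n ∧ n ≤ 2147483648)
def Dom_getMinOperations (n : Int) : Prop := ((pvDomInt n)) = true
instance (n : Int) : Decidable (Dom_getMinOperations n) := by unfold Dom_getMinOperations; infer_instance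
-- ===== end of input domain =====

-- B replaces A's bit-by-bit while loop by the closed form popcount((3*n) XOR n) (the NAF-weight identity); objective: simpler.

-- ===== PORT A =====
-- A's while loop, step for step; the Nat fuel argument only makes the recursion total
-- (the equivalence theorem shows 2*|n|+4 steps always reach n = 0, so the fuel branch is never the result).
def pyLoopA : Nat → Int → Int → Int
  | 0, _, c => c
  | f+1, n, c =>
    if n = 0 then c                               -- while n:
    else if PySem.Int.band n 1 = 0 then           -- if n & 1 == 0:
      pyLoopA f (n >>> (1:Nat)) c                 --   n >>= 1
    else                                          -- else: n += 1 if n != 1 and (n & 3) == 3 else -1; c += 1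
      pyLoopA f (n + if n ≠ 1 ∧ PySem.Int.band n 3 = 3 then 1 else -1) (c + 1)

def getMinOperations (n : Int) : Int := pyLoopA (2 * n.natAbs + 4) n 0

-- ===== PORT B =====
-- Source B: return bin((3 * n) ^ n).count('1').  (3*n) ^ n is never negative (3n and n share
-- their sign), so bin(...).count('1') is exactly the set-bit count PySem.Int.bitCount.
def getMinOperations_alt (n : Int) : Int :=
  (PySem.Int.bitCount (PySem.Int.bxor (3 * n) n) : Int)

-- ===== PRECONDITION & SPEC =====
def Spec_getMinOperations (n : Int) (out : Int) : Prop := out = getMinOperations_alt n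
instance (n : Int) (out : Int) : Decidable (Spec_getMinOperations n out) := by unfold Spec_getMinOperations; infer_instance

-- ===== CLAIM (what is proved, stated in full; the proofs are below) =====
def Claim_equal_getMinOperations : Prop := ∀ (n : Int), Dom_getMinOperations n → Spec_getMinOperations n (getMinOperations n)

-- ===== LEMMAS AND PROOFS =====

-- xor distributes over the last binary digit: the three Nat shapes, from Nat.bitwise_bit
theorem pvNatXor_ff (m n : Nat) : (2*m) ^^^ (2*n) = 2*(m ^^^ n) := by
  have := Nat.bitwise_bit (f := bne) rfl false m false n
  simpa [Nat.bit_val, HXor.hXor, Nat.xor] using this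

theorem pvNatXor_tt (m n : Nat) : (2*m+1) ^^^ (2*n+1) = 2*(m ^^^ n) := by
  have := Nat.bitwise_bit (f := bne) rfl true m true n
  simpa [Nat.bit_val, HXor.hXor, Nat.xor, Nat.add_comm] using this

theorem pvNatXor_ft (m n : Nat) : (2*m) ^^^ (2*n+1) = 2*(m ^^^ n)+1 := by
  have := Nat.bitwise_bit (f := bne) rfl false m true n
  simpa [Nat.bit_val, HXor.hXor, Nat.xor, Nat.add_comm] using this

-- the same three shapes for Python's two's-complement xor on Int, by sign analysis
theorem pvBxor_even_even (a b : Int) :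
    PySem.Int.bxor (2*a) (2*b) = 2 * PySem.Int.bxor a b := by
  unfold PySem.Int.bxor
  rcases (by omega : 0 ≤ a ∨ a < 0) with ha | ha <;> rcases (by omega : 0 ≤ b ∨ b < 0) with hb | hb
  · rw [if_pos (by omega : (0:Int) ≤ 2*a), if_pos (by omega : (0:Int) ≤ 2*b), if_pos ha, if_pos hb,
      (by omega : (2*a).toNat = 2*a.toNat), (by omega : (2*b).toNat = 2*b.toNat), pvNatXor_ff]
    push_cast; ring
  · rw [if_pos (by omega : (0:Int) ≤ 2*a), if_neg (by omega : ¬ (0:Int) ≤ 2*b), if_pos ha,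
      if_neg (by omega : ¬ (0:Int) ≤ b),
      (by omega : (2*a).toNat = 2*a.toNat), (by omega : (-(2*b)-1).toNat = 2*(-b-1).toNat+1), pvNatXor_ft]
    push_cast; ring
  · rw [if_neg (by omega : ¬ (0:Int) ≤ 2*a), if_pos (by omega : (0:Int) ≤ 2*b),
      if_neg (by omega : ¬ (0:Int) ≤ a), if_pos hb,
      (by omega : (-(2*a)-1).toNat = 2*(-a-1).toNat+1), (by omega : (2*b).toNat = 2*b.toNat),
      Nat.xor_comm, pvNatXor_ft, Nat.xor_comm]
    push_cast; ring
  · rw [if_neg (by omega : ¬ (0:Int) ≤ 2*a), if_neg (by omega : ¬ (0:Int) ≤ 2*b),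
      if_neg (by omega : ¬ (0:Int) ≤ a), if_neg (by omega : ¬ (0:Int) ≤ b),
      (by omega : (-(2*a)-1).toNat = 2*(-a-1).toNat+1), (by omega : (-(2*b)-1).toNat = 2*(-b-1).toNat+1),
      pvNatXor_tt]
    push_cast; ring

theorem pvBxor_odd_odd (a b : Int) :
    PySem.Int.bxor (2*a+1) (2*b+1) = 2 * PySem.Int.bxor a b := by
  unfold PySem.Int.bxor
  rcases (by omega : 0 ≤ a ∨ a < 0) with ha | ha <;> rcases (by omega : 0 ≤ b ∨ b < 0) with hb | hb
  · rw [if_pos (by omega : (0:Int) ≤ 2*a+1), if_pos (by omega : (0:Int) ≤ 2*b+1), if_pos ha, if_pos hb,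
      (by omega : (2*a+1).toNat = 2*a.toNat+1), (by omega : (2*b+1).toNat = 2*b.toNat+1), pvNatXor_tt]
    push_cast; ring
  · rw [if_pos (by omega : (0:Int) ≤ 2*a+1), if_neg (by omega : ¬ (0:Int) ≤ 2*b+1), if_pos ha,
      if_neg (by omega : ¬ (0:Int) ≤ b),
      (by omega : (2*a+1).toNat = 2*a.toNat+1), (by omega : (-(2*b+1)-1).toNat = 2*(-b-1).toNat),
      Nat.xor_comm, pvNatXor_ft, Nat.xor_comm]
    push_cast; ring
  · rw [if_neg (by omega : ¬ (0:Int) ≤ 2*a+1), if_pos (by omega : (0:Int) ≤ 2*b+1),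
      if_neg (by omega : ¬ (0:Int) ≤ a), if_pos hb,
      (by omega : (-(2*a+1)-1).toNat = 2*(-a-1).toNat), (by omega : (2*b+1).toNat = 2*b.toNat+1),
      pvNatXor_ft]
    push_cast; ring
  · rw [if_neg (by omega : ¬ (0:Int) ≤ 2*a+1), if_neg (by omega : ¬ (0:Int) ≤ 2*b+1),
      if_neg (by omega : ¬ (0:Int) ≤ a), if_neg (by omega : ¬ (0:Int) ≤ b),
      (by omega : (-(2*a+1)-1).toNat = 2*(-a-1).toNat), (by omega : (-(2*b+1)-1).toNat = 2*(-b-1).toNat),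
      pvNatXor_ff]
    push_cast; ring

theorem pvBxor_even_odd (a b : Int) :
    PySem.Int.bxor (2*a) (2*b+1) = 2 * PySem.Int.bxor a b + 1 := by
  unfold PySem.Int.bxor
  rcases (by omega : 0 ≤ a ∨ a < 0) with ha | ha <;> rcases (by omega : 0 ≤ b ∨ b < 0) with hb | hb
  · rw [if_pos (by omega : (0:Int) ≤ 2*a), if_pos (by omega : (0:Int) ≤ 2*b+1), if_pos ha, if_pos hb,
      (by omega : (2*a).toNat = 2*a.toNat), (by omega : (2*b+1).toNat = 2*b.toNat+1), pvNatXor_ft]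
    push_cast; ring
  · rw [if_pos (by omega : (0:Int) ≤ 2*a), if_neg (by omega : ¬ (0:Int) ≤ 2*b+1), if_pos ha,
      if_neg (by omega : ¬ (0:Int) ≤ b),
      (by omega : (2*a).toNat = 2*a.toNat), (by omega : (-(2*b+1)-1).toNat = 2*(-b-1).toNat),
      pvNatXor_ff]
    push_cast; ring
  · rw [if_neg (by omega : ¬ (0:Int) ≤ 2*a), if_pos (by omega : (0:Int) ≤ 2*b+1),
      if_neg (by omega : ¬ (0:Int) ≤ a), if_pos hb,
      (by omega : (-(2*a)-1).toNat = 2*(-a-1).toNat+1), (by omega : (2*b+1).toNat = 2*b.toNat+1),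
      pvNatXor_tt]
    push_cast; ring
  · rw [if_neg (by omega : ¬ (0:Int) ≤ 2*a), if_neg (by omega : ¬ (0:Int) ≤ 2*b+1),
      if_neg (by omega : ¬ (0:Int) ≤ a), if_neg (by omega : ¬ (0:Int) ≤ b),
      (by omega : (-(2*a)-1).toNat = 2*(-a-1).toNat+1), (by omega : (-(2*b+1)-1).toNat = 2*(-b-1).toNat),
      Nat.xor_comm, pvNatXor_ft, Nat.xor_comm]
    push_cast; ring

theorem pvBxor_odd_even (a b : Int) :
    PySem.Int.bxor (2*a+1) (2*b) = 2 * PySem.Int.bxor a b + 1 := by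
  rw [PySem.Int.bxor_comm, pvBxor_even_odd, PySem.Int.bxor_comm]

theorem pvBxor_nonneg {a b : Int} (h : 0 ≤ a ↔ 0 ≤ b) : 0 ≤ PySem.Int.bxor a b := by
  unfold PySem.Int.bxor
  split_ifs with h1 h2 h3
  · positivity
  · exact absurd (h.mp h1) h2
  · exact absurd (h.mpr h3) h1
  · positivity

theorem pvNatAnd3 (p : Nat) : p &&& Int.toNat 3 = p % 4 := by
  have := Nat.and_two_pow_sub_one_eq_mod p 2
  norm_num at this ⊢
  exact this

theorem pvBand_three (n : Int) : PySem.Int.band n 3 = n % 4 := by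
  unfold PySem.Int.band
  rcases (by omega : 0 ≤ n ∨ n < 0) with hn | hn
  · rw [if_pos hn, if_pos (by omega : (0:Int) ≤ 3), pvNatAnd3 n.toNat]
    omega
  · rw [if_neg (by omega : ¬ (0:Int) ≤ n), if_pos (by omega : (0:Int) ≤ 3),
      Nat.and_comm, pvNatAnd3]
    omega

theorem pvBc_two_mul {x : Int} (hx : 0 ≤ x) :
    PySem.Int.bitCount (2*x) = PySem.Int.bitCount x := by
  rcases (by omega : x = 0 ∨ 0 < x) with rfl | hx'
  · norm_num
  · rw [PySem.Int.bitCount_of_pos (by omega : (0:Int) < 2*x)]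
    rw [show PySem.Int.mod (2*x) 2 = 0 by rw [PySem.Int.mod_eq_emod_of_pos (by omega)]; omega,
      show PySem.Int.floordiv (2*x) 2 = x by rw [PySem.Int.floordiv_eq_ediv_of_pos (by omega)]; omega]
    simp

theorem pvBc_two_mul_add_one {x : Int} (hx : 0 ≤ x) :
    PySem.Int.bitCount (2*x+1) = PySem.Int.bitCount x + 1 := by
  rw [PySem.Int.bitCount_of_pos (by omega : (0:Int) < 2*x+1)]
  rw [show PySem.Int.mod (2*x+1) 2 = 1 by rw [PySem.Int.mod_eq_emod_of_pos (by omega)]; omega,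
    show PySem.Int.floordiv (2*x+1) 2 = x by rw [PySem.Int.floordiv_eq_ediv_of_pos (by omega)]; omega]
  omega

-- the shift identity E(k): popcount((3k+2) ^ k) = popcount((3(k+1)) ^ (k+1)), by induction on bits
theorem pvE (m : Nat) : ∀ k : Int, k.natAbs ≤ m →
    PySem.Int.bitCount (PySem.Int.bxor (3*k+2) k)
      = PySem.Int.bitCount (PySem.Int.bxor (3*k+3) (k+1)) := by
  induction m with
  | zero =>
    intro k hk
    obtain rfl : k = 0 := by omega
    decide
  | succ m IH =>
    intro k hk
    by_cases h0 : k = 0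
    · subst h0; decide
    by_cases h1 : k = -1
    · subst h1; decide
    rcases (by omega : k % 2 = 0 ∨ k % 2 = 1) with he | ho
    · obtain ⟨j, rfl⟩ : ∃ j, k = 2*j := ⟨k/2, by omega⟩
      rw [show (3*(2*j)+2 : Int) = 2*(3*j+1) by ring, pvBxor_even_even,
        show (3*(2*j)+3 : Int) = 2*(3*j+1)+1 by ring, show (2*j+1 : Int) = 2*j+1 from rfl,
        pvBxor_odd_odd]
    · obtain ⟨j, rfl⟩ : ∃ j, k = 2*j+1 := ⟨k/2, by omega⟩
      rw [show (3*(2*j+1)+2 : Int) = 2*(3*j+2)+1 by ring, pvBxor_odd_odd,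
        show (3*(2*j+1)+3 : Int) = 2*(3*j+3) by ring, show (2*j+1+1 : Int) = 2*(j+1) by ring,
        pvBxor_even_even,
        pvBc_two_mul (pvBxor_nonneg (by omega)), pvBc_two_mul (pvBxor_nonneg (by omega))]
      exact IH j (by omega)

theorem pvLoop_zero (f : Nat) (c : Int) : pyLoopA f 0 c = c := by
  cases f <;> simp [pyLoopA]

theorem pvShift_one (x : Int) : (2*x) >>> (1:Nat) = x := by
  rw [Int.shiftRight_eq_div_pow]; push_cast; omega

-- loop invariant: with enough fuel, A's loop adds exactly popcount((3n) ^ n) to the counter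
theorem pvLoop_eq (f : Nat) : ∀ n c : Int, 2 * n.natAbs + 4 ≤ f →
    pyLoopA f n c = c + (PySem.Int.bitCount (PySem.Int.bxor (3*n) n) : Int) := by
  induction f using Nat.strong_induction_on with
  | _ f IH =>
  intro n c hf
  obtain ⟨f', rfl⟩ : ∃ f', f = f'+1 := ⟨f-1, by omega⟩
  by_cases hn0 : n = 0
  · subst hn0
    simp [pyLoopA]
  have hband1 : PySem.Int.band n 1 = n % 2 := by
    rw [PySem.Int.band_one, PySem.Int.mod_eq_emod_of_pos (by omega)]
  rcases (by omega : n % 2 = 0 ∨ n % 2 = 1) with hpar | hpar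
  · -- even step: halve
    obtain ⟨k, rfl⟩ : ∃ k, n = 2*k := ⟨n/2, by omega⟩
    simp only [pyLoopA]
    rw [if_neg hn0, if_pos (show PySem.Int.band (2*k) 1 = 0 by rw [hband1]; omega), pvShift_one,
      IH f' (by omega) k c (by omega),
      show (3*(2*k) : Int) = 2*(3*k) by ring, pvBxor_even_even,
      pvBc_two_mul (pvBxor_nonneg (by omega))]
  · rcases (by omega : n % 4 = 1 ∨ n % 4 = 3) with h4 | h4
    · -- n ≡ 1 (mod 4): subtract one, then the next step halves
      have hc1 : ¬ PySem.Int.band n 1 = 0 := by rw [hband1]; omega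
      have hcond : ¬ (n ≠ 1 ∧ PySem.Int.band n 3 = 3) := by
        rw [pvBand_three]; rintro ⟨-, h⟩; omega
      simp only [pyLoopA]
      rw [if_neg hn0, if_neg hc1, if_neg hcond]
      by_cases h1 : n = 1
      · subst h1
        rw [show (1 : Int) + -1 = 0 by norm_num, pvLoop_zero,
          show (PySem.Int.bitCount (PySem.Int.bxor (3*1) 1) : Int) = 1 by decide]
      · obtain ⟨q, rfl⟩ : ∃ q, n = 4*q+1 := ⟨n/4, by omega⟩
        obtain ⟨f'', rfl⟩ : ∃ f'', f' = f''+1 := ⟨f'-1, by omega⟩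
        rw [show (4*q+1 + -1 : Int) = 2*(2*q) by ring]
        simp only [pyLoopA]
        rw [if_neg (show ¬ (2*(2*q) : Int) = 0 by omega),
          if_pos (show PySem.Int.band (2*(2*q)) 1 = 0 by
            rw [PySem.Int.band_one, PySem.Int.mod_eq_emod_of_pos (by omega)]; omega),
          pvShift_one,
          IH f'' (by omega) (2*q) (c+1) (by omega),
          show (3*(2*q) : Int) = 2*(3*q) by ring, pvBxor_even_even,
          pvBc_two_mul (pvBxor_nonneg (by omega)),
          show (3*(4*q+1) : Int) = 2*(2*(3*q)+1)+1 by ring,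
          show (4*q+1 : Int) = 2*(2*q)+1 by ring,
          pvBxor_odd_odd]
        rw [pvBxor_odd_even (3*q) q,
          pvBc_two_mul (by have := pvBxor_nonneg (a := 3*q) (b := q) (by omega); omega),
          pvBc_two_mul_add_one (pvBxor_nonneg (by omega))]
        push_cast; ring
    · -- n ≡ 3 (mod 4): add one, then the next step halves
      have hc1 : ¬ PySem.Int.band n 1 = 0 := by rw [hband1]; omega
      have hcond : (n ≠ 1 ∧ PySem.Int.band n 3 = 3) := ⟨by omega, by rw [pvBand_three]; omega⟩
      simp only [pyLoopA]
      rw [if_neg hn0, if_neg hc1, if_pos hcond]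
      by_cases h1 : n = -1
      · subst h1
        rw [show (-1 : Int) + 1 = 0 by norm_num, pvLoop_zero,
          show (PySem.Int.bitCount (PySem.Int.bxor (3*(-1)) (-1)) : Int) = 1 by decide]
      · obtain ⟨q, rfl⟩ : ∃ q, n = 4*q+3 := ⟨n/4, by omega⟩
        obtain ⟨f'', rfl⟩ : ∃ f'', f' = f''+1 := ⟨f'-1, by omega⟩
        rw [show (4*q+3 + 1 : Int) = 2*(2*(q+1)) by ring]
        simp only [pyLoopA]
        rw [if_neg (show ¬ (2*(2*(q+1)) : Int) = 0 by omega),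
          if_pos (show PySem.Int.band (2*(2*(q+1))) 1 = 0 by
            rw [PySem.Int.band_one, PySem.Int.mod_eq_emod_of_pos (by omega)]; omega),
          pvShift_one,
          IH f'' (by omega) (2*(q+1)) (c+1) (by omega),
          show (3*(2*(q+1)) : Int) = 2*(3*(q+1)) by ring, pvBxor_even_even,
          pvBc_two_mul (pvBxor_nonneg (by omega)),
          show (3*(4*q+3) : Int) = 2*(2*(3*q+2))+1 by ring,
          show (4*q+3 : Int) = 2*(2*q+1)+1 by ring,
          pvBxor_odd_odd,
          pvBxor_even_odd (3*q+2) q,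
          pvBc_two_mul (by have := pvBxor_nonneg (a := 3*q+2) (b := q) (by omega); omega),
          pvBc_two_mul_add_one (pvBxor_nonneg (by omega)),
          pvE q.natAbs q le_rfl,
          show (3*q+3 : Int) = 3*(q+1) by ring]
        push_cast; ring

-- ===== VERDICT (by name: the statement is the Claim_ definition above) =====
theorem getMinOperations_spec : Claim_equal_getMinOperations := by
  intro n _
  unfold Spec_getMinOperations getMinOperations getMinOperations_alt
  rw [pvLoop_eq _ n 0 (by omega)]
  ring
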